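-- pv_equiv track=rewrite | github.com/reimerlab/datasci_tools | python_tools/numpy_utils.py | all_subarrays
-- ===== SOURCE A (Python) =====
-- def all_subarrays (l):
--     """
--     Ex:
--     from python_tools import numpy_utils as nu
--     nu.all_subarrays([[1,"a"],[2,"b"],[3,"c"]])
--
--     Output:
--     [[],
--      [[1, 'a']],
--      [[2, 'b']],
--      [[1, 'a'], [2, 'b']],
--      [[3, 'c']],
--      [[1, 'a'], [3, 'c']],
--      [[2, 'b'], [3, 'c']],
--      [[1, 'a'], [2, 'b'], [3, 'c']]]
--     """
--     base = []
--     lists = [base]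
--     for i in range(len(l)):
--         orig = lists[:]
--         new = l[i]
--         for j in range(len(lists)):
--             lists[j] = lists[j] + [new]
--         lists = orig + lists
--
--     return lists
-- ===== SOURCE B (Python) =====
-- def all_subarrays(l):
--     def pick(sub, mask):
--         if not sub:
--             return []
--         rest = pick(sub[1:], mask >> 1)
--         return [sub[0]] + rest if mask & 1 else rest
--     return [pick(l, mask) for mask in range(1 << len(l))]
-- ===== Notes on version B (the rewrite author's own statement) =====
-- stated objective: alternative
-- what changed: Replaces the in-place doubling loop (copy the list of subsets, append the new element to each, concatenate) with direct bitmask enumeration: for each mask in range(2**n) the subset is built by a recursive picker reading mask bit by bit.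
import Mathlib
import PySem

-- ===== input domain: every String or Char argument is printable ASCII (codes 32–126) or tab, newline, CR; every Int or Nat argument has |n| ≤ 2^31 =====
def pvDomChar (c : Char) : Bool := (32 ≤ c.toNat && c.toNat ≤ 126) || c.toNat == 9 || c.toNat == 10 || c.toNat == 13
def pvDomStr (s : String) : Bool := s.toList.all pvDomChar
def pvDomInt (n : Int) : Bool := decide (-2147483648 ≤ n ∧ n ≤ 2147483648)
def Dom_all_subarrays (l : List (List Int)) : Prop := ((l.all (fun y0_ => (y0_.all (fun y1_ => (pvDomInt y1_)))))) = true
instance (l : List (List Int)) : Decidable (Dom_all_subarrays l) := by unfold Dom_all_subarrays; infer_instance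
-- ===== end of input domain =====

-- B replaces A's in-place doubling loop by direct bitmask enumeration (same cost, different algorithm).

-- ===== PORT A =====
-- for i in range(len(l)): orig = lists[:]; new = l[i]; lists[j] = lists[j] + [new] for all j; lists = orig + lists
-- (i is always in range, so l[i] is ported as getD i []).
def all_subarrays (l : List (List Int)) : List (List (List Int)) :=
  (List.range l.length).foldl
    (fun lists i =>
      let new := l.getD i []
      lists ++ lists.map (fun s => s ++ [new]))
    [[]]

-- ===== PORT B =====
-- pick(sub, mask): bit-by-bit recursive subset picker (mask & 1 tests the low bit, mask >> 1 shifts).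
def pick (sub : List (List Int)) (mask : Nat) : List (List Int) :=
  match sub with
  | [] => []
  | x :: xs =>
    let rest := pick xs (mask >>> 1)
    if mask &&& 1 = 1 then x :: rest else rest

def all_subarrays_alt (l : List (List Int)) : List (List (List Int)) :=
  (List.range (2 ^ l.length)).map (fun mask => pick l mask)

-- ===== PRECONDITION & SPEC =====
def Spec_all_subarrays (l : List (List Int)) (out : List (List (List Int))) : Prop := out = all_subarrays_alt l
instance (l : List (List Int)) (out : List (List (List Int))) : Decidable (Spec_all_subarrays l out) := by unfold Spec_all_subarrays; infer_instance

-- ===== CLAIM (what is proved, stated in full; the proofs are below) =====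
def Claim_equal_all_subarrays : Prop := ∀ (l : List (List Int)), Dom_all_subarrays l → Spec_all_subarrays l (all_subarrays l)

-- ===== LEMMAS AND PROOFS =====

-- A's index loop is a foldl over the elements themselves.
theorem foldlRange_eq_foldl (l : List (List Int)) (acc : List (List (List Int))) :
    (List.range l.length).foldl
      (fun lists i => lists ++ lists.map (fun s => s ++ [l.getD i []])) acc
    = l.foldl (fun lists new => lists ++ lists.map (fun s => s ++ [new])) acc := by
  induction l generalizing acc with
  | nil => rfl
  | cons x xs ih =>
    rw [List.length_cons, List.range_succ_eq_map, List.foldl_cons, List.foldl_map]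
    simp only [List.getD_cons_zero, List.getD_cons_succ]
    exact ih _

theorem pick_low_bit (xs : List (List Int)) (x : List Int) (mask : Nat) :
    pick (x :: xs) mask = if mask % 2 = 1 then x :: pick xs (mask / 2) else pick xs (mask / 2) := by
  simp [pick, Nat.and_one_is_mod, Nat.shiftRight_one]

theorem pick_append (ys : List (List Int)) (x : List Int) (m : Nat) :
    pick (ys ++ [x]) m
      = pick ys m ++ (if (m >>> ys.length) % 2 = 1 then [x] else []) := by
  induction ys generalizing m with
  | nil => simp [pick, Nat.and_one_is_mod]
  | cons y ys ih =>
    rw [List.cons_append, pick_low_bit, pick_low_bit, ih]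
    have : m >>> (y :: ys).length = (m / 2) >>> ys.length := by
      rw [Nat.shiftRight_eq_div_pow, Nat.shiftRight_eq_div_pow, Nat.div_div_eq_div_mul,
        List.length_cons, pow_succ, Nat.mul_comm]
    rw [this]
    split <;> simp

theorem pick_add_pow (ys : List (List Int)) (k : Nat) :
    pick ys (2 ^ ys.length + k) = pick ys k := by
  induction ys generalizing k with
  | nil => rfl
  | cons y ys ih =>
    rw [pick_low_bit, pick_low_bit]
    have h2 : (2 ^ (y :: ys).length + k) % 2 = k % 2 := by
      rw [List.length_cons, pow_succ, Nat.mul_comm]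
      exact Nat.mul_add_mod 2 _ k
    have h3 : (2 ^ (y :: ys).length + k) / 2 = 2 ^ ys.length + k / 2 := by
      rw [List.length_cons, pow_succ, Nat.mul_comm]
      exact Nat.mul_add_div (by norm_num) _ _
    rw [h2, h3, ih]

theorem shift_high_bit (n k : Nat) (hk : k < 2 ^ n) : ((2 ^ n + k) >>> n) % 2 = 1 := by
  have hp : 0 < 2 ^ n := Nat.pos_of_ne_zero (by positivity)
  rw [Nat.shiftRight_eq_div_pow, Nat.add_comm, Nat.add_div_right _ hp, Nat.div_eq_of_lt hk]

theorem shift_low (n k : Nat) (hk : k < 2 ^ n) : (k >>> n) % 2 = 0 := by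
  rw [Nat.shiftRight_eq_div_pow, Nat.div_eq_of_lt hk]

-- main: A's left fold equals B's mask enumeration
theorem foldl_eq_masks (l : List (List Int)) :
    l.foldl (fun lists new => lists ++ lists.map (fun s => s ++ [new])) [[]]
      = (List.range (2 ^ l.length)).map (fun mask => pick l mask) := by
  induction l using List.reverseRecOn with
  | nil => rfl
  | append_singleton ys x ih =>
    rw [List.foldl_append, List.foldl_cons, List.foldl_nil, ih]
    have hlen : (ys ++ [x]).length = ys.length + 1 := by simp
    rw [hlen, pow_succ, Nat.mul_two, List.range_add, List.map_append, List.map_map]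
    congr 1
    · apply List.map_congr_left
      intro m hm
      rw [List.mem_range] at hm
      rw [pick_append, shift_low _ _ hm]
      simp
    · rw [List.map_map]
      apply List.map_congr_left
      intro m hm
      rw [List.mem_range] at hm
      simp only [Function.comp]
      rw [pick_append, pick_add_pow, shift_high_bit _ _ hm]
      simp

-- ===== VERDICT (by name: the statement is the Claim_ definition above) =====
theorem all_subarrays_spec : Claim_equal_all_subarrays := by
  intro l _
  unfold Spec_all_subarrays all_subarrays all_subarrays_alt
  rw [foldlRange_eq_foldl, foldl_eq_masks]
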